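-- pv_equiv track=rewrite | github.com/anosatsuk124/jujutsu-summarize-hook | src/vcs_cc_hook/summarizer.py | _are_in_same_directory
-- ===== SOURCE A (Python) =====
-- from typing import Any, Dict, List, Optional, Tuple
--
-- def _are_in_same_directory(files1: List[str], files2: List[str]) -> bool:
--     """2つのファイルグループが同一ディレクトリ内の変更かどうか判定する。"""
--     if not files1 or not files2:
--         return False
--
--     # 各ファイルのディレクトリを取得
--     dirs1 = set()
--     dirs2 = set()
--
--     for file in files1:
--         if "/" in file:
--             dirs1.add(file.rsplit("/", 1)[0])
--         else:
--             dirs1.add(".")  # ルートディレクトリ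
--
--     for file in files2:
--         if "/" in file:
--             dirs2.add(file.rsplit("/", 1)[0])
--         else:
--             dirs2.add(".")  # ルートディレクトリ
--
--     # 共通ディレクトリがあるかチェック
--     return bool(dirs1 & dirs2)
-- ===== SOURCE B (Python) =====
-- def _are_in_same_directory(files1, files2):
--     # Brute-force pairwise comparison: no sets at all; the guard is subsumed
--     # (any() over an empty cross product is False).
--     return any(
--         (a.rsplit("/", 1)[0] if "/" in a else ".") == (b.rsplit("/", 1)[0] if "/" in b else ".")
--         for a in files1
--         for b in files2
--     )
-- ===== Notes on version B (the rewrite author's own statement) =====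
-- stated objective: alternative
-- what changed: Replaces the two directory sets and their intersection with a direct brute-force pairwise scan: any pair (a, b) from files1 x files2 whose directories are equal, with no sets built and no explicit empty-input guard.
import Mathlib
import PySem

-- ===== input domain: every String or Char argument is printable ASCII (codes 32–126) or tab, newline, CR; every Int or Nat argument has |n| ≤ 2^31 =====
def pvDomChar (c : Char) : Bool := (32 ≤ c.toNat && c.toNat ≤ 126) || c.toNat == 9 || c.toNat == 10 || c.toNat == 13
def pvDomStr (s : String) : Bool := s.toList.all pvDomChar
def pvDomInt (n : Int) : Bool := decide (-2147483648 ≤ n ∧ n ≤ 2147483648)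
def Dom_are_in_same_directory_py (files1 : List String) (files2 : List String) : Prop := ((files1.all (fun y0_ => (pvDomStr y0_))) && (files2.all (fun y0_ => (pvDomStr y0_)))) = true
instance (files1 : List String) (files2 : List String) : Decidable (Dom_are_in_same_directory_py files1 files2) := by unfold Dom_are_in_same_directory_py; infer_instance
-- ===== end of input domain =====

-- B replaces the two directory sets plus intersection with a direct brute-force pairwise scan (no sets).
-- ===== PORT A =====
-- pyDir f = f.rsplit("/", 1)[0] if "/" in f else "."  (hand port, exact: the prefix of f before its last '/')
def pyDir (f : String) : String :=
  if '/' ∈ f.toList then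
    String.ofList (((f.toList.reverse.dropWhile (fun c => c ≠ '/')).drop 1).reverse)
  else "."

def are_in_same_directory_py (files1 : List String) (files2 : List String) : Bool :=
  if files1 = [] ∨ files2 = [] then false
  else
    let dirs1 : PySem.Set String := files1.foldl (fun s f => PySem.Set.add s (pyDir f)) PySem.Set.empty
    let dirs2 : PySem.Set String := files2.foldl (fun s f => PySem.Set.add s (pyDir f)) PySem.Set.empty
    !(PySem.Set.inter dirs1 dirs2).isEmpty

-- ===== PORT B =====
def are_in_same_directory_py_alt (files1 : List String) (files2 : List String) : Bool :=
  files1.any (fun a => files2.any (fun b => pyDir a == pyDir b))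

-- ===== PRECONDITION & SPEC =====
def Spec_are_in_same_directory_py (files1 : List String) (files2 : List String) (out : Bool) : Prop := out = are_in_same_directory_py_alt files1 files2
instance (files1 : List String) (files2 : List String) (out : Bool) : Decidable (Spec_are_in_same_directory_py files1 files2 out) := by unfold Spec_are_in_same_directory_py; infer_instance

-- ===== CLAIM (what is proved, stated in full; the proofs are below) =====
def Claim_equal_are_in_same_directory_py : Prop := ∀ (files1 : List String) (files2 : List String), Dom_are_in_same_directory_py files1 files2 → Spec_are_in_same_directory_py files1 files2 (are_in_same_directory_py files1 files2)

-- ===== LEMMAS AND PROOFS =====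
theorem alt_eq_exists (files1 files2 : List String) :
    are_in_same_directory_py_alt files1 files2 = true ↔
      ∃ a ∈ files1, ∃ b ∈ files2, pyDir a = pyDir b := by
  unfold are_in_same_directory_py_alt
  simp [List.any_eq_true]

-- ===== VERDICT (by name: the statement is the Claim_ definition above) =====
theorem are_in_same_directory_py_spec : Claim_equal_are_in_same_directory_py := by
  intro files1 files2 _
  unfold Spec_are_in_same_directory_py are_in_same_directory_py
  split_ifs with h
  · rcases h with h | h <;> simp [are_in_same_directory_py_alt, h]
  · rw [← PySem.Set.update_map_eq_foldl_add, ← PySem.Set.update_map_eq_foldl_add]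
    simp only [PySem.Set.update_empty]
    rcases Bool.eq_false_or_eq_true ((files2.map pyDir |> PySem.Set.ofList |> PySem.Set.inter (PySem.Set.ofList (files1.map pyDir))).isEmpty) with he | he
    · -- empty intersection: no pair can share a directory
      rw [he]
      rw [List.isEmpty_iff] at he
      rw [Bool.not_true]
      symm
      rw [← Bool.not_eq_true, alt_eq_exists]
      rintro ⟨a, ha, b, hb, hab⟩
      have hin : pyDir a ∈ PySem.Set.inter (PySem.Set.ofList (files1.map pyDir)) (PySem.Set.ofList (files2.map pyDir)) := by
        rw [PySem.Set.mem_inter, PySem.Set.mem_ofList, PySem.Set.mem_ofList]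
        exact ⟨List.mem_map.2 ⟨a, ha, rfl⟩, List.mem_map.2 ⟨b, hb, hab.symm⟩⟩
      rw [he] at hin
      exact absurd hin List.not_mem_nil
    · -- nonempty intersection: extract a common directory and a matching pair
      rw [he]
      rw [List.isEmpty_eq_false_iff_exists_mem] at he
      obtain ⟨x, hx⟩ := he
      rw [PySem.Set.mem_inter] at hx
      obtain ⟨hx1, hx2⟩ := hx
      rw [PySem.Set.mem_ofList, List.mem_map] at hx1 hx2
      obtain ⟨a, ha, rfl⟩ := hx1
      obtain ⟨b, hb, hba⟩ := hx2
      symm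
      rw [Bool.not_false, alt_eq_exists]
      exact ⟨a, ha, b, hb, hba.symm⟩
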